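-- pv_equiv track=rewrite | github.com/sindacatobioinfo/cholestrack | cholestrack/analysis_workflows/utils.py | replace_yaml_value
-- ===== SOURCE A (Python) =====
-- def replace_yaml_value(yaml_content, key, value, section=None):
--     """
--     Replace a value in YAML content.
--
--     Args:
--         yaml_content: str, complete YAML content
--         key: str, key to replace
--         value: str, new value
--         section: str, optional section to limit search
--
--     Returns:
--         str: Updated YAML content
--     """
--     lines = yaml_content.split('\n')
--     updated_lines = []
--     in_section = (section is None)  # If no section specified, search everywhere
--
--     for line in lines:
--         # Check if we're entering the target section
--         if section and line.strip().startswith(f'{section}:'):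
--             in_section = True
--
--         # Check if we're leaving the target section (another top-level key)
--         elif section and in_section and line and not line[0].isspace() and ':' in line:
--             in_section = False
--
--         # Replace the value if we find the key
--         if in_section and line.strip().startswith(f'{key}:'):
--             indent = len(line) - len(line.lstrip())
--             # Preserve comments
--             if '#' in line:
--                 comment_part = line[line.index('#'):]
--                 updated_line = f'{" " * indent}{key}: {value}  {comment_part}'
--             else:
--                 updated_line = f'{" " * indent}{key}: {value}'
--             updated_lines.append(updated_line)
--         else:
--             updated_lines.append(line)
--
--     return '\n'.join(updated_lines)
-- ===== SOURCE B (Python) =====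
-- def replace_yaml_value(yaml_content, key, value, section=None):
--     """Replace a YAML key's value (optionally only inside `section`).
--
--     Two-phase rewrite: a per-line `active` predicate recomputes the
--     section state by scanning backwards for the nearest section-opener
--     or top-level boundary line, then a single comprehension rewrites
--     the matching key lines.
--     """
--     lines = yaml_content.split('\n')
--
--     def is_opener(l):
--         return l.strip().startswith(section + ':')
--
--     def is_boundary(l):
--         return bool(l) and not l[0].isspace() and ':' in l
--
--     def active(i):
--         if section is None:
--             return True
--         if not section:
--             return False
--         for j in range(i, -1, -1):
--             if is_opener(lines[j]):
--                 return True
--             if is_boundary(lines[j]):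
--                 return False
--         return False
--
--     def rewrite(line):
--         indent = ' ' * (len(line) - len(line.lstrip()))
--         if '#' in line:
--             return f'{indent}{key}: {value}  {line[line.index("#"):]}'
--         return f'{indent}{key}: {value}'
--
--     return '\n'.join(
--         rewrite(line) if active(i) and line.strip().startswith(key + ':')
--         else line
--         for i, line in enumerate(lines))
-- ===== Notes on version B (the rewrite author's own statement) =====
-- stated objective: alternative
-- what changed: A threads a mutable in_section flag through one stateful pass; B is a two-phase decomposition: a per-line 'active' predicate that rescans backwards for the nearest section-opener or top-level boundary line, then a single comprehension rewriting the matching key lines.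
import Mathlib
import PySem

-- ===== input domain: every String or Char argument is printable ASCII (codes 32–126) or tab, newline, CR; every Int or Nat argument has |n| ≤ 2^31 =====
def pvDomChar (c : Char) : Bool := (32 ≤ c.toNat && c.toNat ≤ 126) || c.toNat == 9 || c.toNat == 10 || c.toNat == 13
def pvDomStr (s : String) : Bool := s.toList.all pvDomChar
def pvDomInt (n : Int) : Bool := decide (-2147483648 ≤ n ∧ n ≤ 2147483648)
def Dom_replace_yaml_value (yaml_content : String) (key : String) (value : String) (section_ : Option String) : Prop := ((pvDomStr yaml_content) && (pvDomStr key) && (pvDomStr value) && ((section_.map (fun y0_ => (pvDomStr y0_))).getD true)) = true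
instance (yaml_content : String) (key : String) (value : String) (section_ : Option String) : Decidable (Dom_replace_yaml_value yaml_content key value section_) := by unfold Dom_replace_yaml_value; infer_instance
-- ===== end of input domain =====

-- B replaces A's stateful single-pass boolean section flag by a two-phase decomposition
-- (a per-line backward search for the nearest section-opener/boundary, then one rewrite map);
-- objective: alternative decomposition, same results.

-- ===== PORT A =====
-- A's loop body as a named step function (state = (in_section, updated_lines)).
def pvAStep (secB : Bool) (sec k v : List Char) (st : Bool × List (List Char)) (line : List Char) : Bool × List (List Char) :=
  let in_section :=
    if secB && PySem.Chars.startswith (PySem.Chars.strip line) (sec ++ [':']) then true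
    else if secB && st.1 && (match line with | [] => false | c :: _ => !PySem.Chars.isspace c)
            && PySem.Chars.isIn [':'] line then false
    else st.1
  if in_section && PySem.Chars.startswith (PySem.Chars.strip line) (k ++ [':']) then
    let indent := line.length - (PySem.Chars.lstrip line).length
    let updated :=
      if PySem.Chars.isIn ['#'] line then
        let comment := PySem.Chars.slice line (some (PySem.Chars.find line ['#'])) none
        List.replicate indent ' ' ++ k ++ [':', ' '] ++ v ++ [' ', ' '] ++ comment
      else
        List.replicate indent ' ' ++ k ++ [':', ' '] ++ v
    (in_section, st.2 ++ [updated])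
  else (in_section, st.2 ++ [line])

def replace_yaml_value (yaml_content : String) (key : String) (value : String) (section_ : Option String) : String :=
  let lines := PySem.Chars.splitOn yaml_content.toList ['\n']
  let secB : Bool := match section_ with | none => false | some s => !s.toList.isEmpty
  let sec : List Char := (section_.map String.toList).getD []
  let res := lines.foldl (pvAStep secB sec key.toList value.toList) (section_.isNone, [])
  String.ofList (PySem.Chars.join ['\n'] res.2)

-- ===== PORT B =====
def pvOpener (sec line : List Char) : Bool :=
  PySem.Chars.startswith (PySem.Chars.strip line) (sec ++ [':'])

def pvBoundary (line : List Char) : Bool :=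
  (match line with | [] => false | c :: _ => !PySem.Chars.isspace c) && PySem.Chars.isIn [':'] line

-- the backward scan `for j in range(i, -1, -1)` over the reversed prefix lines[i], …, lines[0]
def pvBack (sec : List Char) : List (List Char) → Bool
  | [] => false
  | l :: rest => if pvOpener sec l then true else if pvBoundary l then false else pvBack sec rest

def pvActive (sec? : Option (List Char)) (lines : List (List Char)) (i : Nat) : Bool :=
  match sec? with
  | none => true
  | some s => if s.isEmpty then false else pvBack s ((lines.take (i + 1)).reverse)

def pvRewrite (k v line : List Char) : List Char :=
  let indent := line.length - (PySem.Chars.lstrip line).length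
  if PySem.Chars.isIn ['#'] line then
    List.replicate indent ' ' ++ k ++ [':', ' '] ++ v ++ [' ', ' ']
      ++ PySem.Chars.slice line (some (PySem.Chars.find line ['#'])) none
  else
    List.replicate indent ' ' ++ k ++ [':', ' '] ++ v

def replace_yaml_value_alt (yaml_content : String) (key : String) (value : String) (section_ : Option String) : String :=
  let lines := PySem.Chars.splitOn yaml_content.toList ['\n']
  let sec? := section_.map String.toList
  let k := key.toList
  String.ofList (PySem.Chars.join ['\n']
    ((List.range lines.length).map (fun i =>
      let line := lines.getD i []
      if pvActive sec? lines i && PySem.Chars.startswith (PySem.Chars.strip line) (k ++ [':'])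
      then pvRewrite k value.toList line
      else line)))

-- ===== PRECONDITION & SPEC =====
def Spec_replace_yaml_value (yaml_content : String) (key : String) (value : String) (section_ : Option String) (out : String) : Prop := out = replace_yaml_value_alt yaml_content key value section_
instance (yaml_content : String) (key : String) (value : String) (section_ : Option String) (out : String) : Decidable (Spec_replace_yaml_value yaml_content key value section_ out) := by unfold Spec_replace_yaml_value; infer_instance

-- ===== CLAIM (what is proved, stated in full; the proofs are below) =====
def Claim_equal_replace_yaml_value : Prop := ∀ (yaml_content : String) (key : String) (value : String) (section_ : Option String), Dom_replace_yaml_value yaml_content key value section_ → Spec_replace_yaml_value yaml_content key value section_ (replace_yaml_value yaml_content key value section_)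

-- ===== LEMMAS AND PROOFS =====

-- Python's truthiness of `section`
def pvSecFlag (sec? : Option (List Char)) : Bool :=
  match sec? with | none => false | some s => !s.isEmpty

-- A's in_section state after consuming a (reversed) prefix r, as B computes it
def pvState (sec? : Option (List Char)) (r : List (List Char)) : Bool :=
  match sec? with
  | none => true
  | some s => if s.isEmpty then false else pvBack s r

-- just A's in_section update
def pvAStepState (secB : Bool) (sec : List Char) (st : Bool) (line : List Char) : Bool :=
  if secB && PySem.Chars.startswith (PySem.Chars.strip line) (sec ++ [':']) then true
  else if secB && st && (match line with | [] => false | c :: _ => !PySem.Chars.isspace c)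
          && PySem.Chars.isIn [':'] line then false
  else st

-- B's output lines, written with an explicit reversed-prefix accumulator
def pvCore (sec? : Option (List Char)) (k v : List Char) : List (List Char) → List (List Char) → List (List Char)
  | _, [] => []
  | r, l :: t =>
    (if pvState sec? (l :: r) && PySem.Chars.startswith (PySem.Chars.strip l) (k ++ [':'])
     then pvRewrite k v l else l) :: pvCore sec? k v (l :: r) t

lemma pvSecB_eq (section_ : Option String) :
    (match section_ with | none => false | some s => !s.toList.isEmpty)
      = pvSecFlag (section_.map String.toList) := by
  cases section_ <;> rfl

lemma pv_pair_if {α : Type} (b x : Bool) (u l : α) (acc : List α) :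
    (if b then (x, acc ++ [u]) else (x, acc ++ [l])) = (x, acc ++ [if b then u else l]) := by
  cases b <;> rfl

lemma pvAStep_eq (secB : Bool) (sec k v : List Char) (st : Bool) (acc : List (List Char)) (line : List Char) :
    pvAStep secB sec k v (st, acc) line
      = (pvAStepState secB sec st line,
         acc ++ [if pvAStepState secB sec st line
                    && PySem.Chars.startswith (PySem.Chars.strip line) (k ++ [':'])
                 then pvRewrite k v line else line]) := by
  simp only [pvAStep, pvAStepState, pvRewrite]
  exact pv_pair_if _ _ _ _ _

-- A's one-line state update agrees with B's backward search extended by one line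
lemma pvStep_state (sec? : Option (List Char)) (r : List (List Char)) (line : List Char) :
    pvAStepState (pvSecFlag sec?) (sec?.getD []) (pvState sec? r) line
      = pvState sec? (line :: r) := by
  cases sec? with
  | none => simp [pvAStepState, pvSecFlag, pvState]
  | some s =>
    cases hs : s.isEmpty with
    | true => simp [pvAStepState, pvSecFlag, pvState, hs]
    | false =>
      simp only [pvAStepState, pvSecFlag, pvState, hs, Option.getD_some, Bool.not_false,
        Bool.true_and]
      cases ho : PySem.Chars.startswith (PySem.Chars.strip line) (s ++ [':']) with
      | true => simp [pvBack, pvOpener, ho]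
      | false =>
        cases hm : (match line with | [] => false | c :: _ => !PySem.Chars.isspace c) with
        | false => simp [pvBack, pvOpener, pvBoundary, ho, hm]
        | true =>
          cases hc : PySem.Chars.isIn [':'] line with
          | false => simp [pvBack, pvOpener, pvBoundary, ho, hm, hc]
          | true =>
            cases hb : pvBack s r <;>
              simp [pvBack, pvOpener, pvBoundary, ho, hm, hc]

-- A's folded loop equals B's accumulator recursion
lemma pvFold_eq_core (sec? : Option (List Char)) (k v : List Char) :
    ∀ (t r acc : List (List Char)),
      (t.foldl (pvAStep (pvSecFlag sec?) (sec?.getD []) k v) (pvState sec? r, acc)).2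
        = acc ++ pvCore sec? k v r t := by
  intro t
  induction t with
  | nil => intro r acc; simp [pvCore]
  | cons l t ih =>
    intro r acc
    rw [List.foldl_cons, pvAStep_eq, pvStep_state, ih (l :: r)]
    simp [pvCore]

-- the accumulator recursion equals B's indexed map
lemma pvCore_eq_map (sec? : Option (List Char)) (k v : List Char) :
    ∀ (t r : List (List Char)),
      pvCore sec? k v r t
        = (List.range t.length).map (fun i =>
            let line := t.getD i []
            if pvState sec? (((r.reverse ++ t).take (r.length + i + 1)).reverse)
                && PySem.Chars.startswith (PySem.Chars.strip line) (k ++ [':'])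
            then pvRewrite k v line else line) := by
  intro t
  induction t with
  | nil => intro r; simp [pvCore]
  | cons l t ih =>
    intro r
    rw [pvCore, ih (l :: r)]
    simp only [List.length_cons, List.range_succ_eq_map, List.map_cons, List.map_map]
    congr 1
    · rw [show r.length + 0 + 1 = r.reverse.length + 1 by simp, List.take_append]
      simp [List.take_of_length_le (by simp : r.reverse.length ≤ r.length + 1)]
    · apply List.map_congr_left
      intro i _
      have hl : (l :: r).reverse ++ t = r.reverse ++ l :: t := by simp
      simp only [Function.comp, hl, List.getD_cons_succ, Nat.succ_eq_add_one]
      have hn : r.length + 1 + i + 1 = r.length + (i + 1) + 1 := by omega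
      rw [hn]

-- B's pvActive is pvState on the reversed taken prefix
lemma pvActive_eq_state (sec? : Option (List Char)) (lines : List (List Char)) (i : Nat) :
    pvActive sec? lines i = pvState sec? ((lines.take (i + 1)).reverse) := by
  cases sec? with
  | none => rfl
  | some s => cases hs : s.isEmpty <;> simp [pvActive, pvState, hs]

-- A's initial state is pvState on the empty prefix
lemma pvInit_eq_state (section_ : Option String) :
    (section_.isNone : Bool) = pvState (section_.map String.toList) [] := by
  cases section_ with
  | none => rfl
  | some s => cases hs : s.toList.isEmpty <;> simp [pvState, pvBack, hs]

-- ===== VERDICT (by name: the statement is the Claim_ definition above) =====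
theorem replace_yaml_value_spec : Claim_equal_replace_yaml_value := by
  intro yaml_content key value section_ _
  simp only [Spec_replace_yaml_value, replace_yaml_value, replace_yaml_value_alt]
  rw [pvSecB_eq, pvInit_eq_state]
  apply congrArg String.ofList
  apply congrArg (PySem.Chars.join ['\n'])
  rw [pvFold_eq_core (section_.map String.toList) key.toList value.toList
      (PySem.Chars.splitOn yaml_content.toList ['\n']) [] []]
  rw [pvCore_eq_map]
  apply List.map_congr_left
  intro i _
  simp [pvActive_eq_state]
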